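-- pv_equiv track=rewrite | github.com/Remy9926/python-projects | news.py | remove_small_words
-- ===== SOURCE A (Python) =====
-- def remove_small_words(a_list):
--     """Removes any words in a list whose length is not at least 3.
--
--     Parameters: a_list is a list of strings
--
--     Returns: A new list that is the old list except it doesn't contain any
--         strings with a length of less than 3."""
--     index = 0
--     while index != len(a_list):
--         if len(a_list[index]) <= 2:
--             del a_list[index]
--         else:
--             index += 1
--     return a_list
-- ===== SOURCE B (Python) =====
-- def remove_small_words(a_list):
--     """Removes any words in a list whose length is not at least 3 (in place)."""
--     write = 0
--     for word in a_list:
--         if len(word) > 2: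
--             a_list[write] = word
--             write += 1
--     del a_list[write:]
--     return a_list
-- ===== Notes on version B (the rewrite author's own statement) =====
-- stated objective: faster
-- what changed: Replaces the quadratic delete-and-shift while loop with a single forward pass using a write pointer that compacts kept words in place and truncates the tail once.
import Mathlib
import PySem

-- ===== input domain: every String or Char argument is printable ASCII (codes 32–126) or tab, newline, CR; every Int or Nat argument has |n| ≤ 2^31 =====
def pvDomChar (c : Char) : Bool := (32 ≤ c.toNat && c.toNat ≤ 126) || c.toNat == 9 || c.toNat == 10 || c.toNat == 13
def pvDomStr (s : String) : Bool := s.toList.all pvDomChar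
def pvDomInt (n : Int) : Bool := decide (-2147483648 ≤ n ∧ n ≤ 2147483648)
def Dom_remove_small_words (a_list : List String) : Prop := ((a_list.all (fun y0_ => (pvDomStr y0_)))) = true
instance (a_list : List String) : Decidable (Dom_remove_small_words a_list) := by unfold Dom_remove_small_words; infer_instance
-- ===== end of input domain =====

-- B replaces A's quadratic delete-and-shift while loop by a single-pass in-place
-- write-pointer compaction followed by one tail truncation (both mutate the list
-- in place in Python; the equivalence proved here is about the returned value).

-- ===== PORT A =====
-- A's while loop: state is (a_list, index); delete shifts, keep advances.
def rswLoopA (a_list : List String) (index : Nat) : List String :=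
  if index = a_list.length then a_list
  else
    match hx : a_list[index]? with
    | none => a_list  -- unreachable totality guard (index < len here)
    | some w =>
      if PySem.Str.len w ≤ 2 then rswLoopA (a_list.eraseIdx index) index
      else rswLoopA a_list (index + 1)
termination_by a_list.length - index
decreasing_by
  · have hlt : index < a_list.length := List.getElem?_eq_some_iff.mp hx |>.1
    have : (a_list.eraseIdx index).length = a_list.length - 1 :=
      List.length_eraseIdx_of_lt hlt
    omega
  · have hlt : index < a_list.length := List.getElem?_eq_some_iff.mp hx |>.1
    omega

def remove_small_words (a_list : List String) : List String :=
  rswLoopA a_list 0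

-- ===== PORT B =====
-- B's single pass: write pointer `s.2`, copy kept word into slot, then truncate.
def rswStepB (s : List String × Nat) (word : String) : List String × Nat :=
  if 2 < PySem.Str.len word then (s.1.set s.2 word, s.2 + 1) else s

def remove_small_words_alt (a_list : List String) : List String :=
  let r := a_list.foldl rswStepB (a_list, 0)
  r.1.take r.2   -- del a_list[write:]

-- ===== PRECONDITION & SPEC =====
def Spec_remove_small_words (a_list : List String) (out : List String) : Prop := out = remove_small_words_alt a_list
instance (a_list : List String) (out : List String) : Decidable (Spec_remove_small_words a_list out) := by unfold Spec_remove_small_words; infer_instance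

-- ===== CLAIM (what is proved, stated in full; the proofs are below) =====
def Claim_equal_remove_small_words : Prop := ∀ (a_list : List String), Dom_remove_small_words a_list → Spec_remove_small_words a_list (remove_small_words a_list)

-- ===== LEMMAS AND PROOFS =====

def pvKeep (w : String) : Bool := decide (2 < PySem.Str.len w)

theorem rswLoopA_eq (n : Nat) : ∀ (l : List String) (i : Nat),
    l.length - i = n → i ≤ l.length →
    rswLoopA l i = l.take i ++ (l.drop i).filter pvKeep := by
  induction n with
  | zero =>
    intro l i hn hle
    have : i = l.length := by omega
    subst this
    rw [rswLoopA]
    simp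
  | succ m ih =>
    intro l i hn hle
    have hlt : i < l.length := by omega
    rw [rswLoopA]
    have hne : ¬ i = l.length := by omega
    simp only [hne, if_false]
    have hx : l[i]? = some l[i] := List.getElem?_eq_getElem hlt
    rw [hx]
    have hdrop : l.drop i = l[i] :: l.drop (i + 1) := List.drop_eq_getElem_cons hlt
    by_cases hc : PySem.Str.len l[i] ≤ 2
    · simp only [hc, if_true]
      have hlen : (l.eraseIdx i).length = l.length - 1 := List.length_eraseIdx_of_lt hlt
      have hkeep : pvKeep l[i] = false := by
        simp [pvKeep, PySem.Str.len_eq] at hc ⊢; omega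
      have := ih (l.eraseIdx i) i (by omega) (by omega)
      rw [this, List.eraseIdx_eq_take_drop_succ]
      rw [List.take_append_of_le_length (by simp; omega), List.take_take, Nat.min_self,
          List.drop_append_of_le_length (by simp; omega)]
      have hnil : List.drop i (List.take i l) = [] := by simp
      rw [hnil, List.nil_append, hdrop, List.filter_cons, hkeep]
      simp only [Bool.false_eq_true, if_false]
    · simp only [hc, if_false]
      have hkeep : pvKeep l[i] = true := by
        simp [pvKeep, PySem.Str.len_eq] at hc ⊢; omega
      have := ih l (i + 1) (by omega) (by omega)
      rw [this, hdrop, List.filter_cons, hkeep]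
      have htk : List.take (i + 1) l = List.take i l ++ [l[i]] := by
        rw [List.take_add_one, hx]; rfl
      rw [htk, List.append_assoc, if_pos rfl, List.singleton_append]
theorem set_append_cons (F : List String) (y x : String) (r : List String) :
    (F ++ y :: r).set F.length x = F ++ x :: r := by
  induction F with
  | nil => simp
  | cons a F ih => simp [ih]

theorem foldlB_eq : ∀ (suf F r : List String),
    (suf.filter pvKeep).length ≤ r.length →
    suf.foldl rswStepB (F ++ r, F.length) =
      (F ++ suf.filter pvKeep ++ r.drop (suf.filter pvKeep).length,
       F.length + (suf.filter pvKeep).length) := by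
  intro suf
  induction suf with
  | nil => intro F r h; simp
  | cons x xs ih =>
    intro F r h
    simp only [List.foldl_cons, rswStepB, List.filter_cons]
    by_cases hc : 2 < PySem.Str.len x
    · have hk : pvKeep x = true := by simp [pvKeep, PySem.Str.len_eq] at hc ⊢; omega
      simp only [hc, if_true, hk]
      obtain ⟨y, r', rfl⟩ : ∃ y r', r = y :: r' := by
        cases r with
        | nil => simp [hk] at h
        | cons y r' => exact ⟨y, r', rfl⟩
      rw [set_append_cons]
      have : F ++ x :: r' = (F ++ [x]) ++ r' := by simp
      rw [this]
      have hlen : F.length + 1 = (F ++ [x]).length := by simp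
      rw [hlen, ih (F ++ [x]) r' (by simp [hk] at h ⊢; omega)]
      simp
      omega
    · have hk : pvKeep x = false := by simp [pvKeep, PySem.Str.len_eq] at hc ⊢; omega
      simp only [hc, if_false, hk]
      rw [ih F r (by simpa [hk] using h)]
      simp

theorem remove_small_words_eq_filter (l : List String) :
    remove_small_words l = l.filter pvKeep := by
  have := rswLoopA_eq (l.length - 0) l 0 rfl (Nat.zero_le _)
  simpa [remove_small_words] using this

theorem remove_small_words_alt_eq_filter (l : List String) :
    remove_small_words_alt l = l.filter pvKeep := by
  unfold remove_small_words_alt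
  have h0 : l.foldl rswStepB (l, 0) =
      (([] : List String) ++ l.filter pvKeep ++ l.drop (l.filter pvKeep).length,
       ([] : List String).length + (l.filter pvKeep).length) := by
    have := foldlB_eq l [] l (List.length_filter_le _ _)
    simpa using this
  rw [h0]
  simp

-- ===== VERDICT (by name: the statement is the Claim_ definition above) =====
theorem remove_small_words_spec : Claim_equal_remove_small_words := by
  intro l _
  unfold Spec_remove_small_words
  rw [remove_small_words_eq_filter, remove_small_words_alt_eq_filter]
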